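-- pv_equiv track=rewrite | github.com/shincap8/holbertonschool-machine_learning | supervised_learning/0x10-nlp_metrics/0-uni_bleu.py | count_clip
-- ===== SOURCE A (Python) =====
-- def counter(phrase):
--     """Return dict with count of words"""
--     dict = {}
--     for x in phrase:
--         if x not in dict:
--             dict[x] = phrase.count(x)
--     return (dict)
--
-- def count_clip(references, sentence):
--     """Count clip"""
--     res = {}
--     ct_sentence = counter(sentence)
--     for ref in references:
--         ct_ref = counter(ref)
--         for k in ct_ref:
--             if k in res:
--                 res[k] = max(ct_ref[k], res[k])
--             else:
--                 res[k] = ct_ref[k]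
--     count_clip = {k: min(ct_sentence.get(k, 0),
--                          res.get(k, 0)) for k in ct_sentence}
--     return (count_clip)
-- ===== SOURCE B (Python) =====
-- def count_clip(references, sentence):
--     """Count clip"""
--     return {w: min(sentence.count(w),
--                    max((ref.count(w) for ref in references), default=0))
--             for w in dict.fromkeys(sentence)}
-- ===== Notes on version B (the rewrite author's own statement) =====
-- stated objective: simpler
-- what changed: B drops A's counter helper and the intermediate max-over-references table: it is a single dict comprehension over the sentence's distinct words, computing each word's clipped count by scanning the references per word (loop nesting reversed), so no dictionaries are built or merged.
import Mathlib
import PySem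

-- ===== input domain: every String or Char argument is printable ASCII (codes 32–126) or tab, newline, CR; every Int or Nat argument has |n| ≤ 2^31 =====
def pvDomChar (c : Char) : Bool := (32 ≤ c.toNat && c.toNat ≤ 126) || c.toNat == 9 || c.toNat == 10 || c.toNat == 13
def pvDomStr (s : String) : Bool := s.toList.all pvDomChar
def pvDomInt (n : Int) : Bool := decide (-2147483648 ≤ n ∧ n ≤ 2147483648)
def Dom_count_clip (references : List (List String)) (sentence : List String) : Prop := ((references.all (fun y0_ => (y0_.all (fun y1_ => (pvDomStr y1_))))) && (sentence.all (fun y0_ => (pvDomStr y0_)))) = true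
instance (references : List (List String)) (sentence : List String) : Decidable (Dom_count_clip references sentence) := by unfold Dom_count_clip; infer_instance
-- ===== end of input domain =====

-- B replaces A's two-phase "build a max-count table over all reference words, then clip" by a
-- single comprehension over the sentence's distinct words (references scanned per word); simpler, same cost.

-- ===== PORT A =====
-- helper `counter(phrase)`: dict of first occurrences mapped to phrase.count(x)
def pvCounter (phrase : List String) : PySem.Dict String Int :=
  phrase.foldl (fun d x => if d.contains x then d else d.insert x ((phrase.count x : Int)))
    PySem.Dict.empty

def count_clip (references : List (List String)) (sentence : List String) : List (String × Int) :=
  let ct_sentence := pvCounter sentence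
  let res := references.foldl (fun res ref =>
      let ct_ref := pvCounter ref
      ct_ref.keys.foldl (fun res k =>
        if res.contains k then res.insert k (max (ct_ref.getD k 0) (res.getD k 0))
        else res.insert k (ct_ref.getD k 0)) res)
    PySem.Dict.empty
  (ct_sentence.keys.foldl
    (fun d k => d.insert k (min (ct_sentence.getD k 0) (res.getD k 0)))
    PySem.Dict.empty).items

-- ===== PORT B =====
def count_clip_alt (references : List (List String)) (sentence : List String) : List (String × Int) :=
  ((PySem.List.dedup sentence).foldl
    (fun d w => d.insert w (min ((sentence.count w : Int))
        (PySem.List.maxD (references.map (fun ref => (ref.count w : Int))) (fun x => x) 0)))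
    PySem.Dict.empty).items

-- ===== PRECONDITION & SPEC =====
def Spec_count_clip (references : List (List String)) (sentence : List String) (out : List (String × Int)) : Prop := out = count_clip_alt references sentence
instance (references : List (List String)) (sentence : List String) (out : List (String × Int)) : Decidable (Spec_count_clip references sentence out) := by unfold Spec_count_clip; infer_instance

-- ===== CLAIM (what is proved, stated in full; the proofs are below) =====
def Claim_equal_count_clip : Prop := ∀ (references : List (List String)) (sentence : List String), Dom_count_clip references sentence → Spec_count_clip references sentence (count_clip references sentence)

-- ===== LEMMAS AND PROOFS =====

-- `counter`'s fold: lookup after the loop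
theorem pvCounter_loop_getD (phrase : List String) (q : String) :
    ∀ (l : List String) (d : PySem.Dict String Int),
      (l.foldl (fun d x => if d.contains x then d else d.insert x ((phrase.count x : Int))) d).getD q 0
        = if q ∈ l ∧ d.contains q = false then (phrase.count q : Int) else d.getD q 0 := by
  intro l
  induction l with
  | nil => intro d; simp
  | cons x t ih =>
      intro d
      simp only [List.foldl_cons]
      by_cases hc : d.contains x
      · rw [if_pos hc, ih d]
        by_cases hqx : q = x
        · subst hqx; simp [hc]
        · simp [hqx]
      · rw [if_neg (by simp [hc]), ih]
        by_cases hqx : q = x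
        · subst hqx
          simp [hc]
        · simp [PySem.Dict.contains_insert, hqx,
            PySem.Dict.getD_insert, List.mem_cons]

theorem pvCounter_getD (phrase : List String) (q : String) :
    (pvCounter phrase).getD q 0 = (phrase.count q : Int) := by
  unfold pvCounter
  rw [pvCounter_loop_getD]
  by_cases h : q ∈ phrase
  · simp [h]
  · simp [h, List.count_eq_zero.mpr h]

theorem pvCounter_loop_keys (phrase : List String) :
    ∀ (l : List String) (d : PySem.Dict String Int),
      (l.foldl (fun d x => if d.contains x then d else d.insert x ((phrase.count x : Int))) d).keys
        = PySem.Set.update d.keys l := by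
  intro l
  induction l with
  | nil => intro d; simp [PySem.Set.update]
  | cons x t ih =>
      intro d
      simp only [List.foldl_cons, PySem.Set.update]
      by_cases hc : d.contains x
      · have hmem : x ∈ d.keys := (PySem.Dict.contains_iff_mem_keys d x).mp hc
        have hx : PySem.Set.add d.keys x = d.keys := by
          simp [PySem.Set.add, PySem.Set.contains, hmem]
        simp [hc, ih d, PySem.Set.update, hx]
      · have hmem : x ∉ d.keys := fun hm => hc ((PySem.Dict.contains_iff_mem_keys d x).mpr hm)
        have hx : PySem.Set.add d.keys x = d.keys ++ [x] := by
          simp [PySem.Set.add, PySem.Set.contains, hmem]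
        simp only [hc, Bool.false_eq_true, if_false, ih,
          PySem.Dict.keys_insert_of_not_contains _ _ (by simpa using hc),
          PySem.Set.update, hx]

theorem pvCounter_keys (phrase : List String) :
    (pvCounter phrase).keys = PySem.List.dedup phrase := by
  unfold pvCounter
  rw [pvCounter_loop_keys]
  simp [PySem.Dict.keys_empty, PySem.Set.update, PySem.Set.ofList_eq_foldl]

-- A's inner loop over one reference's counter keys: lookup after the loop
theorem inner_loop_getD (f : String → Int) (hf : ∀ k, 0 ≤ f k) (q : String) :
    ∀ (ks : List String) (res : PySem.Dict String Int),
      (ks.foldl (fun r k =>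
          if r.contains k then r.insert k (max (f k) (r.getD k 0)) else r.insert k (f k)) res).getD q 0
        = if q ∈ ks then max (f q) (res.getD q 0) else res.getD q 0 := by
  intro ks
  induction ks with
  | nil => intro res; simp
  | cons k t ih =>
      intro res
      simp only [List.foldl_cons, ih]
      by_cases hqk : q = k
      · subst hqk
        by_cases hc : res.contains q
        · by_cases hqt : q ∈ t
          · simp [hc, hqt]
          · simp [hc, hqt]
        · have h0 : res.getD q 0 = 0 := PySem.Dict.getD_of_not_contains _ _ (by simpa using hc)
          by_cases hqt : q ∈ t
          · simp [hc, hqt, h0, max_eq_left (hf q)]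
          · simp [hc, hqt, h0, max_eq_left (hf q)]
      · by_cases hc : res.contains k <;>
          simp [hc, PySem.Dict.getD_insert, hqk, List.mem_cons]

-- A's outer loop over references: lookup after the loop is the running max of reference counts
theorem outer_loop_getD (q : String) :
    ∀ (refs : List (List String)) (r : PySem.Dict String Int), 0 ≤ r.getD q 0 →
      (refs.foldl (fun res ref =>
          let ct_ref := pvCounter ref
          ct_ref.keys.foldl (fun res k =>
            if res.contains k then res.insert k (max (ct_ref.getD k 0) (res.getD k 0))
            else res.insert k (ct_ref.getD k 0)) res) r).getD q 0
        = refs.foldl (fun m ref => max m ((ref.count q : Int))) (r.getD q 0) := by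
  intro refs
  induction refs with
  | nil => intro r _; simp
  | cons ref t ih =>
      intro r hr
      simp only [List.foldl_cons]
      have hstep : ((pvCounter ref).keys.foldl (fun res k =>
            if res.contains k then res.insert k (max ((pvCounter ref).getD k 0) (res.getD k 0))
            else res.insert k ((pvCounter ref).getD k 0)) r).getD q 0
          = max (r.getD q 0) ((ref.count q : Int)) := by
        rw [inner_loop_getD (fun k => (pvCounter ref).getD k 0)
          (fun k => by simp [pvCounter_getD]) q]
        simp only [pvCounter_getD, pvCounter_keys]
        by_cases hm : q ∈ ref
        · simp [hm, max_comm]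
        · simp [hm, List.count_eq_zero.mpr hm,
            max_eq_left hr]
      rw [ih _ (by rw [hstep]; exact le_max_of_le_left hr), hstep]

-- B's builtin max over the per-reference counts is the same running max
theorem maxD_counts (refs : List (List String)) (w : String) :
    PySem.List.maxD (refs.map (fun ref => (ref.count w : Int))) (fun x => x) 0
      = refs.foldl (fun m ref => max m ((ref.count w : Int))) 0 := by
  cases refs with
  | nil => rfl
  | cons r t =>
      simp only [List.map_cons, PySem.List.maxD, PySem.List.max?_id_cons, Option.getD_some,
        List.foldl_cons, List.foldl_map]
      rw [max_eq_right (Int.natCast_nonneg _)]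

-- a dict-comprehension over distinct keys, as a plain map (specializes PySem.Dict.items_foldl_insert_fresh)
theorem items_fresh (l : List String) (v : String → Int) (hnd : l.Nodup) :
    (l.foldl (fun d w => d.insert w (v w)) PySem.Dict.empty).items = l.map (fun w => (w, v w)) := by
  simpa using PySem.Dict.items_foldl_insert_fresh (l := l) (k := fun a => a) (v := v)
    (d := PySem.Dict.empty) (fun a _ => PySem.Dict.contains_empty a) (by simpa using hnd)

-- ===== VERDICT (by name: the statement is the Claim_ definition above) =====
theorem count_clip_spec : Claim_equal_count_clip := by
  intro references sentence _
  unfold Spec_count_clip count_clip count_clip_alt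
  dsimp only
  rw [items_fresh _ _ (by simp [pvCounter_keys]),
      items_fresh _ _ (PySem.List.nodup_dedup sentence),
      pvCounter_keys]
  apply List.map_congr_left
  intro k _
  rw [pvCounter_getD, maxD_counts,
    outer_loop_getD k references PySem.Dict.empty (by simp)]
  simp
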